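-- pv_equiv track=rewrite | github.com/leowucn/sincity | sync_anki_v2/utils.py | trim_blocks
-- ===== SOURCE A (Python) =====
-- def trim_blocks(blocks):
--     """
--     将每个块的前后空白行去掉
--     """
--     res = []
--     for block in blocks:
--         start_index = -1
--         end_index = -1
--
--         for index, line_info in enumerate(block):
--             if line_info[1].strip():
--                 start_index = index
--                 break
--
--         for index in range(len(block) - 1, -1, -1):
--             if block[index][1].strip():
--                 end_index = index
--                 break
--
--         if end_index > start_index:
--             res.append(block[start_index:end_index + 1])
--
--     return res
-- ===== SOURCE B (Python) =====
-- def trim_blocks(blocks):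
--     """
--     将每个块的前后空白行去掉
--     """
--     res = []
--     for block in blocks:
--         t = list(block)
--         while t and not t[0][1].strip():
--             del t[0]
--         while t and not t[-1][1].strip():
--             del t[-1]
--         if len(t) > 1:
--             res.append(t)
--     return res
-- ===== Notes on version B (the rewrite author's own statement) =====
-- stated objective: simpler
-- what changed: B never computes boundary indices at all: instead of A's forward break-scan and reverse range break-scan with -1 sentinels followed by a slice, B peels blank lines directly off both ends of a copy of the block (two while-pop loops) and keeps the result when more than one line remains.
import Mathlib
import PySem

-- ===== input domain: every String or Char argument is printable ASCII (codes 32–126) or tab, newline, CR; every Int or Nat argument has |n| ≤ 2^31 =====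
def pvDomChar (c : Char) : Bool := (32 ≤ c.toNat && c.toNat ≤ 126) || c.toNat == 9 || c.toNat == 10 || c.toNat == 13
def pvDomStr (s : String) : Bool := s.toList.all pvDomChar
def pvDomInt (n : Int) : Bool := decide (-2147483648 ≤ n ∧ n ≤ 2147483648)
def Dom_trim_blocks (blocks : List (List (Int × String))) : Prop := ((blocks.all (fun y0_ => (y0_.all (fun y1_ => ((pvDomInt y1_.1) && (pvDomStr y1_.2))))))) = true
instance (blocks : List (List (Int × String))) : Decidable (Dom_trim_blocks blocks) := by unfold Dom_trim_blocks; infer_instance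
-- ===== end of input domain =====

-- B peels blank lines off both ends of each block instead of computing boundary indices and slicing (objective: simpler).

-- ===== PORT A =====
-- first loop: 'for index, line_info in enumerate(block): if line_info[1].strip(): start_index = index; break'
def pvFirstScan : List (Int × (Int × String)) → Int
  | [] => -1
  | (i, li) :: rest => if PySem.Str.strip li.2 != "" then i else pvFirstScan rest

-- second loop: 'for index in range(len(block)-1, -1, -1): if block[index][1].strip(): end_index = index; break'
def pvLastScan (block : List (Int × String)) : List Int → Int
  | [] => -1
  | i :: rest =>
    match PySem.List.pyGet? block i with
    | some li => if PySem.Str.strip li.2 != "" then i else pvLastScan block rest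
    | none => -1   -- IndexError; unreachable since range indices are in bounds

def trim_blocks (blocks : List (List (Int × String))) : List (List (Int × String)) :=
  blocks.foldl (fun res block =>
    let start_index := pvFirstScan (PySem.List.enumerate block 0)
    let end_index := pvLastScan block (PySem.List.pyRange ((block.length : Int) - 1) (-1) (-1))
    if end_index > start_index then
      res ++ [PySem.List.slice block (some start_index) (some (end_index + 1))]
    else res) []

-- ===== PORT B =====
-- 'while t and not t[0][1].strip(): del t[0]'
def pvPeelFront : List (Int × String) → List (Int × String)
  | [] => []
  | x :: xs => if !(PySem.Str.strip x.2 != "") then pvPeelFront xs else x :: xs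

-- 'while t and not t[-1][1].strip(): del t[-1]'
def pvPeelBack (t : List (Int × String)) : List (Int × String) :=
  if h : t = [] then t
  else if !(PySem.Str.strip (t.getLast h).2 != "") then pvPeelBack t.dropLast else t
termination_by t.length
decreasing_by
  simpa [List.length_dropLast] using Nat.sub_lt (List.length_pos_iff.mpr h) Nat.one_pos

def trim_blocks_alt (blocks : List (List (Int × String))) : List (List (Int × String)) :=
  blocks.foldl (fun res block =>
    let t := pvPeelBack (pvPeelFront block)
    if t.length > 1 then res ++ [t] else res) []

-- ===== PRECONDITION & SPEC =====
def Spec_trim_blocks (blocks : List (List (Int × String))) (out : List (List (Int × String))) : Prop := out = trim_blocks_alt blocks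
instance (blocks : List (List (Int × String))) (out : List (List (Int × String))) : Decidable (Spec_trim_blocks blocks out) := by unfold Spec_trim_blocks; infer_instance

-- ===== CLAIM =====
def Claim_equal_trim_blocks : Prop := ∀ (blocks : List (List (Int × String))), Dom_trim_blocks blocks → Spec_trim_blocks blocks (trim_blocks blocks)

-- ===== LEMMAS AND PROOFS =====

-- blankness predicate used by both ports
def pvBlank (li : Int × String) : Bool := !(PySem.Str.strip li.2 != "")

theorem pv_peel_front_eq (block : List (Int × String)) :
    pvPeelFront block = block.dropWhile pvBlank := by
  induction block with
  | nil => rfl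
  | cons x xs ih =>
    by_cases h : PySem.Str.strip x.2 = ""
    · simp [pvPeelFront, List.dropWhile_cons, pvBlank, h, ih]
    · simp [pvPeelFront, List.dropWhile_cons, pvBlank, h]

theorem pv_peel_back_eq (t : List (Int × String)) :
    pvPeelBack t = (t.reverse.dropWhile pvBlank).reverse := by
  induction t using List.reverseRecOn with
  | nil => rw [pvPeelBack]; rfl
  | append_singleton xs x ih =>
    rw [pvPeelBack, dif_neg (by simp)]
    rw [List.getLast_append_singleton, List.dropLast_concat]
    simp only [List.reverse_append, List.reverse_cons, List.reverse_nil, List.nil_append,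
      List.cons_append, List.nil_append]
    by_cases h : PySem.Str.strip x.2 = ""
    · simp [h, ih, List.dropWhile_cons, pvBlank]
    · simp [h, List.dropWhile_cons, pvBlank]

theorem pv_first_scan_eq (block : List (Int × String)) (s : Int) :
    pvFirstScan (PySem.List.enumerate block s) =
      if (block.dropWhile pvBlank).isEmpty then -1
      else s + ((block.takeWhile pvBlank).length : Int) := by
  induction block generalizing s with
  | nil => simp [pvFirstScan, PySem.List.enumerate_nil]
  | cons x xs ih =>
    rw [PySem.List.enumerate_cons, pvFirstScan]
    by_cases h : PySem.Str.strip x.2 = ""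
    · rw [if_neg (by simp [h]), ih (s + 1)]
      simp only [List.dropWhile_cons, List.takeWhile_cons, pvBlank, h, bne_self_eq_false,
        Bool.not_false, if_true]
      split
      · rfl
      · simp only [List.length_cons]
        push_cast
        ring
    · rw [if_pos (by simp [h])]
      simp [List.dropWhile_cons, List.takeWhile_cons, pvBlank, h]

def pvLastAux (block : List (Int × String)) : Nat → Int
  | 0 => -1
  | m + 1 =>
    if (block[m]?.elim false (fun li => PySem.Str.strip li.2 != "")) then (m : Int)
    else pvLastAux block m

theorem pv_last_scan_aux (block : List (Int × String)) (m : Nat) (hm : m ≤ block.length) :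
    pvLastScan block (PySem.List.pyRange ((m : Int) - 1) (-1) (-1)) = pvLastAux block m := by
  induction m with
  | zero => rw [PySem.List.pyRange_neg_one_eq_nil (by norm_num)]; rfl
  | succ m ih =>
    rw [PySem.List.pyRange_neg_one_cons (by push_cast; omega)]
    have hgl : (((m + 1 : Nat)) : Int) - 1 = (m : Int) := by push_cast; omega
    have hlt : m < block.length := by omega
    rw [hgl, pvLastScan, PySem.List.pyGet?_natCast, List.getElem?_eq_getElem hlt]
    by_cases h : (PySem.Str.strip block[m].2 != "") = true
    · simp [pvLastAux, h, List.getElem?_eq_getElem hlt]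
    · simp only [Bool.not_eq_true] at h
      simp [pvLastAux, h, List.getElem?_eq_getElem hlt, ih (by omega)]

theorem pv_last_aux_append (block : List (Int × String)) (x : Int × String) (m : Nat)
    (hm : m ≤ block.length) :
    pvLastAux (block ++ [x]) m = pvLastAux block m := by
  induction m with
  | zero => rfl
  | succ m ih =>
    rw [pvLastAux, pvLastAux, List.getElem?_append_left (by omega), ih (by omega)]

theorem pv_last_aux_eq (block : List (Int × String)) :
    pvLastAux block block.length =
      if (block.reverse.dropWhile pvBlank).isEmpty then -1
      else ((block.reverse.dropWhile pvBlank).length : Int) - 1 := by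
  induction block using List.reverseRecOn with
  | nil => rfl
  | append_singleton xs x ih =>
    have hlen : (xs ++ [x]).length = xs.length + 1 := by simp
    rw [hlen, pvLastAux, List.getElem?_concat_length]
    simp only [List.reverse_append, List.reverse_cons, List.reverse_nil, List.nil_append,
      List.cons_append, List.nil_append] at *
    by_cases h : PySem.Str.strip x.2 = ""
    · simp only [Option.elim_some]
      rw [if_neg (by simp [h])]
      rw [pv_last_aux_append xs x xs.length le_rfl, ih]
      have hb : pvBlank x = true := by simp [pvBlank, h]
      rw [List.dropWhile_cons_of_pos hb]
    · simp only [Option.elim_some]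
      rw [if_pos (by simp [h])]
      simp [List.dropWhile_cons, pvBlank, h]

theorem pv_dropWhile_eq_drop {α : Type} (p : α → Bool) (l : List α) :
    l.dropWhile p = l.drop (l.takeWhile p).length := by
  induction l with
  | nil => rfl
  | cons x xs ih =>
    by_cases h : p x = true <;> simp [List.dropWhile_cons, List.takeWhile_cons, h, ih]

-- the per-block core: A's index computation + slice equals B's two-sided peel
theorem pv_block_eq (block : List (Int × String)) :
    (let start_index := pvFirstScan (PySem.List.enumerate block 0)
     let end_index := pvLastScan block (PySem.List.pyRange ((block.length : Int) - 1) (-1) (-1))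
     if end_index > start_index then
       ([PySem.List.slice block (some start_index) (some (end_index + 1))] : List (List (Int × String)))
     else []) =
    (let t := pvPeelBack (pvPeelFront block)
     if t.length > 1 then [t] else []) := by
  rw [pv_peel_front_eq, pv_peel_back_eq]
  rw [pv_first_scan_eq block 0, pv_last_scan_aux block block.length le_rfl, pv_last_aux_eq]
  set d := block.dropWhile pvBlank with hd
  by_cases hemp : d.isEmpty
  · -- every line blank: both sides produce nothing
    have hall : ∀ li ∈ block, pvBlank li = true := by
      intro li hli
      by_contra hb
      have := List.dropWhile_eq_nil_iff (l := block) (p := pvBlank)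
      rw [List.isEmpty_iff] at hemp
      rw [← hd] at this
      exact hb (this.mp hemp li hli)
    have hrev : (block.reverse.dropWhile pvBlank).isEmpty := by
      rw [List.isEmpty_iff, List.dropWhile_eq_nil_iff]
      intro li hli; exact hall li (List.mem_reverse.mp hli)
    rw [if_pos hemp, if_pos hrev]
    have hrevd : (d.reverse.dropWhile pvBlank) = [] := by
      rw [List.isEmpty_iff] at hemp; simp [hemp]
    simp [hrevd]
  · -- some line non-blank
    have hdne : d ≠ [] := by intro hnil; exact hemp (by simp [hnil])
    rw [if_neg hemp]
    set a := (block.takeWhile pvBlank).length with ha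
    -- trailing-blank counts of block and of d agree, since d contains a non-blank line
    have hsplit : block = block.takeWhile pvBlank ++ d := (List.takeWhile_append_dropWhile).symm
    have hdhead : pvBlank (d.head hdne) = false := List.head_dropWhile_not pvBlank hdne
    have hdrev : block.reverse.dropWhile pvBlank = d.reverse.dropWhile pvBlank ++ (block.takeWhile pvBlank).reverse := by
      conv_lhs => rw [hsplit]
      rw [List.reverse_append, List.dropWhile_append]
      have : ¬ (d.reverse.dropWhile pvBlank).isEmpty := by
        rw [List.isEmpty_iff]
        intro hnil
        have := List.dropWhile_eq_nil_iff (l := d.reverse) (p := pvBlank)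
        have hall := this.mp hnil
        have := hall (d.head hdne) (by rw [List.mem_reverse]; exact List.head_mem hdne)
        rw [hdhead] at this; exact Bool.false_ne_true this
      simp [this]
    have hrne : d.reverse.dropWhile pvBlank ≠ [] := by
      intro hnil
      have := List.dropWhile_eq_nil_iff (l := d.reverse) (p := pvBlank)
      have := this.mp hnil (d.head hdne) (by rw [List.mem_reverse]; exact List.head_mem hdne)
      rw [hdhead] at this; exact Bool.false_ne_true this
    have hrevemp : ¬ (block.reverse.dropWhile pvBlank).isEmpty := by
      rw [hdrev]; simp [List.isEmpty_iff, hrne]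
    rw [if_neg hrevemp]
    set r := d.reverse.dropWhile pvBlank with hr
    -- B's kept segment
    have hrlen : r.length ≤ d.length := by
      calc r.length ≤ d.reverse.length := List.length_dropWhile_le _ _
        _ = d.length := List.length_reverse
    have hblen : (block.reverse.dropWhile pvBlank).length = r.length + a := by
      rw [hdrev]; simp [ha]
    have halen : a + d.length = block.length := by
      conv_rhs => rw [hsplit]; rw [List.length_append]
    -- r.reverse as a drop/take of block
    have hrrev : r.reverse = (block.drop a).take r.length := by
      have hdd : block.drop a = d := by
        conv_lhs => rw [hsplit]
        rw [List.drop_append_of_le_length (by simp [ha])]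
        simp [ha]
      rw [hdd]
      have : r.reverse = d.take (d.length - (d.reverse.takeWhile pvBlank).length) := by
        rw [hr]
        rw [pv_dropWhile_eq_drop]
        rw [List.reverse_drop]
        simp
      rw [this]
      congr 1
      have : r.length = d.reverse.length - (d.reverse.takeWhile pvBlank).length := by
        rw [hr, pv_dropWhile_eq_drop, List.length_drop]
      rw [this]; simp
    -- now compare the two guarded singletons
    by_cases hgt : ((block.reverse.dropWhile pvBlank).length : Int) - 1 > (0 : Int) + ((block.takeWhile pvBlank).length : Int)
    · rw [if_pos hgt]
      have h1 : 1 < r.length := by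
        rw [hblen] at hgt; push_cast at hgt; omega
      rw [if_pos (by simpa using h1)]
      congr 1
      have hb : ((block.reverse.dropWhile pvBlank).length : Int) - 1 + 1 = ((r.length + a : Nat) : Int) := by
        rw [hblen]; push_cast; ring
      rw [hb]
      have hz : (0 : Int) + ((block.takeWhile pvBlank).length : Int) = ((a : Nat) : Int) := by
        rw [← ha]; ring
      rw [hz, PySem.List.slice_natCast]
      rw [hrrev]
      congr 1
      omega
    · rw [if_neg hgt]
      have h1 : ¬ 1 < r.length := by
        rw [hblen] at hgt; push_cast at hgt; omega
      rw [if_neg (by simpa using h1)]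

theorem trim_blocks_spec : Claim_equal_trim_blocks := by
  intro blocks _
  show trim_blocks blocks = trim_blocks_alt blocks
  simp only [trim_blocks, trim_blocks_alt]
  congr 1
  funext res block
  have h := pv_block_eq block
  simp only at h ⊢
  by_cases hA : pvLastScan block (PySem.List.pyRange ((block.length : Int) - 1) (-1) (-1)) >
      pvFirstScan (PySem.List.enumerate block 0) <;>
    by_cases hB : (pvPeelBack (pvPeelFront block)).length > 1 <;>
      simp [hA, hB] at h ⊢ <;> simp [h]
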